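-- pv_equiv track=rewrite | github.com/hidagent/dataagent | source/dataagent-core/dataagent_core/middleware/skills.py | _format_skills_list
-- ===== SOURCE A (Python) =====
-- from typing import NotRequired, TypedDict, cast
--
-- class SkillMetadata(TypedDict):
--     """Metadata for a skill."""
--     name: str
--     description: str
--     path: str
--     source: str
--
-- def _format_skills_list(skills: list[SkillMetadata]) -> str:
--     if not skills:
--         return "(No skills available yet)"
--
--     builtin_skills = [s for s in skills if s["source"] == "builtin"]
--     user_skills = [s for s in skills if s["source"] == "user"]
--     project_skills = [s for s in skills if s["source"] == "project"]
--
--     lines = []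
--
--     if builtin_skills:
--         lines.append("**Built-in Skills:**")
--         for skill in builtin_skills:
--             lines.append(f"- **{skill['name']}**: {skill['description']}")
--             lines.append(f"  → Read `{skill['path']}` for full instructions")
--         lines.append("")
--
--     if user_skills:
--         lines.append("**User Skills:**")
--         for skill in user_skills:
--             lines.append(f"- **{skill['name']}**: {skill['description']}")
--             lines.append(f"  → Read `{skill['path']}` for full instructions")
--         lines.append("")
--
--     if project_skills:
--         lines.append("**Project Skills:**")
--         for skill in project_skills:
--             lines.append(f"- **{skill['name']}**: {skill['description']}")
--             lines.append(f"  → Read `{skill['path']}` for full instructions")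
--
--     return "\n".join(lines)
-- ===== SOURCE B (Python) =====
-- def _format_skills_list(skills):
--     if not skills:
--         return "(No skills available yet)"
--
--     groups = {"builtin": [], "user": [], "project": []}
--     for s in skills:
--         src = s["source"]
--         if src in groups:
--             groups[src].append(s)
--
--     lines = []
--     for key, header, trailing_blank in (
--         ("builtin", "**Built-in Skills:**", True),
--         ("user", "**User Skills:**", True),
--         ("project", "**Project Skills:**", False),
--     ):
--         group = groups[key]
--         if group:
--             lines.append(header)
--             for sk in group:
--                 lines.append(f"- **{sk['name']}**: {sk['description']}")
--                 lines.append(f"  → Read `{sk['path']}` for full instructions")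
--             if trailing_blank:
--                 lines.append("")
--     return "\n".join(lines)
-- ===== Notes on version B (the rewrite author's own statement) =====
-- stated objective: simpler
-- what changed: B groups skills by source in a single pass into a dict and then renders the three sections from one ordered table of (key, header, trailing_blank) tuples, instead of A's three separate filter comprehensions and three copy-pasted formatting blocks.
import Mathlib
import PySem

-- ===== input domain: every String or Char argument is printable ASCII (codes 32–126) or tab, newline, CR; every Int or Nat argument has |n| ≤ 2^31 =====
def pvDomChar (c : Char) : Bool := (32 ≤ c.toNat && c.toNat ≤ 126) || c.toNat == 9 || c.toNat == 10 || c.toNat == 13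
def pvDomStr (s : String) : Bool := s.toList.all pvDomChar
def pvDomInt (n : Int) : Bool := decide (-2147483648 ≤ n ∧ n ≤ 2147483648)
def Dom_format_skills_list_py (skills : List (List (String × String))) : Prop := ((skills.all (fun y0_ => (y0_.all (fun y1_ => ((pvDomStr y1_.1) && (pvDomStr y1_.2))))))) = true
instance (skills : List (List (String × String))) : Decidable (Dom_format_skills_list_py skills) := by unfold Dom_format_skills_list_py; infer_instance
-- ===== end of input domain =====

-- B reorganises the same formatting: one grouping pass plus a table-driven
-- rendering loop, instead of A's three filters and three copied blocks.
-- Dict lookup s[k] (first match in the association list); "" only outside Pre_.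
def sget (d : List (String × String)) (k : String) : String :=
  ((d.find? (fun p => p.1 == k)).map (·.2)).getD ""

-- the two f-string lines both Pythons emit per skill
def skillLines (s : List (String × String)) : List String :=
  ["- **" ++ sget s "name" ++ "**: " ++ sget s "description",
   "  → Read `" ++ sget s "path" ++ "` for full instructions"]

-- ===== PORT A =====
def format_skills_list_py (skills : List (List (String × String))) : String :=
  if skills.isEmpty then "(No skills available yet)"
  else
    let builtin_skills := skills.filter (fun s => sget s "source" == "builtin")
    let user_skills := skills.filter (fun s => sget s "source" == "user")
    let project_skills := skills.filter (fun s => sget s "source" == "project")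
    let lines : List String := []
    let lines := if builtin_skills.isEmpty then lines else
      (builtin_skills.foldl (fun acc s => acc ++ skillLines s)
        (lines ++ ["**Built-in Skills:**"])) ++ [""]
    let lines := if user_skills.isEmpty then lines else
      (user_skills.foldl (fun acc s => acc ++ skillLines s)
        (lines ++ ["**User Skills:**"])) ++ [""]
    let lines := if project_skills.isEmpty then lines else
      project_skills.foldl (fun acc s => acc ++ skillLines s)
        (lines ++ ["**Project Skills:**"])
    PySem.Str.join "\n" lines

-- ===== PORT B =====
-- one grouping pass: the dict {"builtin": …, "user": …, "project": …} as a triple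
def groupStep (g : List (List (String × String)) × List (List (String × String)) × List (List (String × String)))
    (s : List (String × String)) :
    List (List (String × String)) × List (List (String × String)) × List (List (String × String)) :=
  let src := sget s "source"
  if src == "builtin" then (g.1 ++ [s], g.2.1, g.2.2)
  else if src == "user" then (g.1, g.2.1 ++ [s], g.2.2)
  else if src == "project" then (g.1, g.2.1, g.2.2 ++ [s])
  else g

-- render one table row: header, the skills' lines, optional trailing blank
def renderRow (lines : List String) (group : List (List (String × String)))
    (header : String) (trailing_blank : Bool) : List String :=
  if group.isEmpty then lines
  else
    let lines := group.foldl (fun acc sk => acc ++ skillLines sk) (lines ++ [header])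
    if trailing_blank then lines ++ [""] else lines

def format_skills_list_py_alt (skills : List (List (String × String))) : String :=
  if skills.isEmpty then "(No skills available yet)"
  else
    let g := skills.foldl groupStep ([], [], [])
    let table := [(g.1, "**Built-in Skills:**", true),
                  (g.2.1, "**User Skills:**", true),
                  (g.2.2, "**Project Skills:**", false)]
    let lines := table.foldl (fun acc row => renderRow acc row.1 row.2.1 row.2.2) []
    PySem.Str.join "\n" lines

-- ===== PRECONDITION & SPEC =====
-- Pre_ excludes exactly the inputs where A raises KeyError: a skill without a
-- "source" key, or a skill routed to a section but missing "name"/"description"/"path".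
def Pre_format_skills_list_py (skills : List (List (String × String))) : Prop :=
  ∀ s ∈ skills, (s.find? (fun p => p.1 == "source")).isSome ∧
    (sget s "source" ∈ (["builtin", "user", "project"] : List String) →
      (s.find? (fun p => p.1 == "name")).isSome ∧
      (s.find? (fun p => p.1 == "description")).isSome ∧
      (s.find? (fun p => p.1 == "path")).isSome)
instance (skills : List (List (String × String))) : Decidable (Pre_format_skills_list_py skills) := by
  unfold Pre_format_skills_list_py; infer_instance
def pvWitness_format_skills_list_py : (List (List (String × String))) :=
  [[("name", "a"), ("description", "b"), ("path", "c"), ("source", "builtin")],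
   [("name", "d"), ("description", "e"), ("path", "f"), ("source", "project")]]
def Spec_format_skills_list_py (skills : List (List (String × String))) (out : String) : Prop := out = format_skills_list_py_alt skills
instance (skills : List (List (String × String))) (out : String) : Decidable (Spec_format_skills_list_py skills out) := by unfold Spec_format_skills_list_py; infer_instance

-- ===== CLAIM (what is proved, stated in full; the proofs are below) =====
def Claim_equal_format_skills_list_py : Prop := ∀ (skills : List (List (String × String))), Dom_format_skills_list_py skills → Pre_format_skills_list_py skills → Spec_format_skills_list_py skills (format_skills_list_py skills)

-- ===== LEMMAS AND PROOFS =====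

-- the one-pass grouping produces exactly A's three filtered lists
theorem groupStep_foldl (skills : List (List (String × String)))
    (b u p : List (List (String × String))) :
    skills.foldl groupStep (b, u, p) =
      (b ++ skills.filter (fun s => sget s "source" == "builtin"),
       u ++ skills.filter (fun s => sget s "source" == "user"),
       p ++ skills.filter (fun s => sget s "source" == "project")) := by
  induction skills generalizing b u p with
  | nil => simp
  | cons s rest ih =>
    simp only [List.foldl_cons, List.filter_cons, groupStep]
    by_cases h1 : sget s "source" = "builtin"
    · simp [h1, ih]
    · by_cases h2 : sget s "source" = "user"
      · simp [h2, ih]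
      · by_cases h3 : sget s "source" = "project"
        · simp [h3, ih]
        · simp [h1, h2, h3, ih]

-- ===== VERDICT (by name: the statement is the Claim_ definition above) =====
theorem format_skills_list_py_spec : Claim_equal_format_skills_list_py := by
  intro skills _ _
  unfold Spec_format_skills_list_py format_skills_list_py format_skills_list_py_alt
  by_cases h : skills.isEmpty
  · simp [h]
  · simp only [h, if_neg, Bool.false_eq_true, not_false_eq_true,
      groupStep_foldl skills [] [] [], List.nil_append, List.foldl_cons,
      List.foldl_nil, renderRow, if_true]
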